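-- pv_equiv track=rewrite | github.com/lorenzoc01/myAOC2024 | Day 22/day22.py | d_rep
-- ===== SOURCE A (Python) =====
-- def d_rep(pool, ss=""):
--     if len(ss.replace("-", "").replace("+", "")) == 4:
--         return {ss}
--     else:
--         res = set()
--         for e in pool:
--             res.update(d_rep(pool, ss+e))
--         return res
-- ===== SOURCE B (Python) =====
-- def d_rep(pool, ss=""):
--     res = set()
--     frontier = [ss]
--     # a completed string has 4 non-sign characters and every useful pool element
--     # contributes at least one, so 5 rounds (collect + at most 4 expansions) suffice
--     for _ in range(5):
--         if not frontier:
--             break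
--         nxt = []
--         for s in frontier:
--             n = len(s.replace("-", "").replace("+", ""))
--             if n == 4:
--                 res.add(s)
--             elif n < 4:
--                 for e in pool:
--                     nxt.append(s + e)
--         frontier = nxt
--     return res
-- ===== Notes on version B (the rewrite author's own statement) =====
-- stated objective: alternative
-- what changed: Replaces A's recursive depth-first set-union enumeration by an explicit iterative worklist: a frontier list expanded level by level for at most five rounds (a completed string has 4 non-sign characters and each useful element adds at least one), completed strings added to one accumulated result set and overshot partial strings pruned as dead branches.
import Mathlib
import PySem

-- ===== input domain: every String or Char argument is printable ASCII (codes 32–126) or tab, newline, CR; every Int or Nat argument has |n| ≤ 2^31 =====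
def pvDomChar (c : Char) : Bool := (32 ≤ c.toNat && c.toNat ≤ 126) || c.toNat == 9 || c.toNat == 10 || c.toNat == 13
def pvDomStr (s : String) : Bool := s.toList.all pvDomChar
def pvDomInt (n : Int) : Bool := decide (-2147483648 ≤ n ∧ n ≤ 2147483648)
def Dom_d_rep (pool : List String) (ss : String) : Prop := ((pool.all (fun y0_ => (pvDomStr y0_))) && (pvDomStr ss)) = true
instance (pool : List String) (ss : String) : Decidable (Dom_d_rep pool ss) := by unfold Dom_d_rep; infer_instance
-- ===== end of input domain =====

-- B replaces A's recursive depth-first set-union enumeration by an explicit iterative worklist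
-- (a frontier expanded level by level, completed strings added to one accumulated result set);
-- alternative decomposition, same cost.

-- ===== PORT A =====
-- A's recursion, fuel-guarded: inside Pre_d_rep (all pool elements share one positive non-sign
-- weight dividing the deficit ≤ 4) the recursion depth is at most 5, so fuel 5 is exact there.
def d_repA (pool : List String) : Nat → String → PySem.Set String
  | 0, _ => PySem.Set.empty
  | f + 1, ss =>
    if PySem.Str.len (PySem.Str.replace (PySem.Str.replace ss "-" "") "+" "") = 4 then
      PySem.Set.ofList [ss]
    else
      pool.foldl (fun res e => PySem.Set.update res (d_repA pool f (ss ++ e))) PySem.Set.empty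

def d_rep (pool : List String) (ss : String) : List String := d_repA pool 5 ss

-- ===== PORT B =====
-- body of B's 'for s in frontier' loop: state = (res, nxt)
def bInner (pool : List String) (st : PySem.Set String × List String) (s : String) :
    PySem.Set String × List String :=
  let n := PySem.Str.len (PySem.Str.replace (PySem.Str.replace s "-" "") "+" "")
  if n = 4 then (PySem.Set.add st.1 s, st.2)
  else if n < 4 then (st.1, st.2 ++ pool.map (fun e => s ++ e))
  else (st.1, st.2)

-- B's 'for _ in range(5): if not frontier: break …' loop: the counter is part of B's
-- algorithm (at most 4 useful expansions plus the collecting round), so this is exact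
-- on every input.
def bLoop (pool : List String) : Nat → PySem.Set String → List String → PySem.Set String
  | _, res, [] => res
  | 0, res, _ => res
  | f + 1, res, frontier =>
    let st := frontier.foldl (bInner pool) (res, [])
    bLoop pool f st.1 st.2

def d_rep_alt (pool : List String) (ss : String) : List String :=
  bLoop pool 5 PySem.Set.empty [ss]

-- ===== PRECONDITION & SPEC =====
-- number of non-sign characters of s (= len(s.replace('-','').replace('+','')))
def pvWt (s : String) : Nat := (s.toList.filter (fun c => !(c == '+') && !(c == '-'))).length

-- Pre_ excludes exactly the inputs on which A never returns (RecursionError / unbounded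
-- recursion: a pool element with no non-sign characters, mixed non-sign lengths, or lengths
-- that overshoot 4 without hitting it); B's bounded loop instead returns there the
-- completions reachable within its five rounds, a value A never produces.
def Pre_d_rep (pool : List String) (ss : String) : Prop :=
  pool = [] ∨ pvWt ss = 4 ∨
    (pvWt ss < 4 ∧ (∀ e ∈ pool, pvWt e = pvWt (pool.headD "")) ∧
      1 ≤ pvWt (pool.headD "") ∧ pvWt (pool.headD "") ∣ (4 - pvWt ss))
instance (pool : List String) (ss : String) : Decidable (Pre_d_rep pool ss) := by
  unfold Pre_d_rep; infer_instance

def pvWitness_d_rep : List String × String := (["ab", "-c+d"], "")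

def Spec_d_rep (pool : List String) (ss : String) (out : List String) : Prop := out = d_rep_alt pool ss
instance (pool : List String) (ss : String) (out : List String) : Decidable (Spec_d_rep pool ss out) := by unfold Spec_d_rep; infer_instance

-- ===== CLAIM (what is proved, stated in full; the proofs are below) =====
def Claim_equal_d_rep : Prop := ∀ (pool : List String) (ss : String), Dom_d_rep pool ss → Pre_d_rep pool ss → Spec_d_rep pool ss (d_rep pool ss)

-- ===== LEMMAS AND PROOFS =====

-- replace with a single-char pattern and empty replacement is filter
theorem pv_go_filter (o : Char) : ∀ (cs : List Char) (fuel : Nat) (acc : List Char),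
    cs.length ≤ fuel →
    PySem.Chars.replace.go [o] [] fuel cs acc = acc.reverse ++ cs.filter (fun c => !(c == o)) := by
  intro cs
  induction cs with
  | nil =>
    intro fuel acc _
    cases fuel <;> simp [PySem.Chars.replace.go]
  | cons c t ih =>
    intro fuel acc h
    cases fuel with
    | zero => simp at h
    | succ f =>
      rw [PySem.Chars.replace.go]
      simp only [List.isPrefixOf, Bool.and_true]
      simp only [List.length_cons] at h
      by_cases hc : (o == c) = true
      · have hco : (c == o) = true := by
          have := eq_of_beq hc; simp [this]
        have hd : List.drop [o].length (c :: t) = t := by simp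
        simp only [hc, if_true, hd, List.filter_cons, hco, Bool.not_true]
        simpa using ih f acc (by omega)
      · have hco : (c == o) = false := by
          rw [Bool.eq_false_iff]; intro h'; exact hc (by simp [eq_of_beq h'])
        simp only [Bool.not_eq_true] at hc
        simp only [hc, Bool.false_eq_true, if_false, List.filter_cons, hco, Bool.not_false]
        rw [ih f (c :: acc) (by omega)]
        simp

theorem pv_replace_filter (o : Char) (s : List Char) :
    PySem.Chars.replace s [o] [] = s.filter (fun c => !(c == o)) := by
  rw [PySem.Chars.replace]
  simp [pv_go_filter o s s.length [] (le_refl _)]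

-- the ports' completeness test computes pvWt
theorem pv_wt_eq (s : String) :
    PySem.Str.len (PySem.Str.replace (PySem.Str.replace s "-" "") "+" "") = (pvWt s : Int) := by
  have h1 : (PySem.Str.replace s "-" "").toList = s.toList.filter (fun c => !(c == '-')) := by
    rw [PySem.Str.toList_replace]; exact pv_replace_filter '-' s.toList
  have h2 : (PySem.Str.replace (PySem.Str.replace s "-" "") "+" "").toList
      = (s.toList.filter (fun c => !(c == '-'))).filter (fun c => !(c == '+')) := by
    rw [PySem.Str.toList_replace, h1]; exact pv_replace_filter '+' _
  rw [PySem.Str.len_eq, h2, List.filter_filter, pvWt]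

theorem pv_wt_append (s t : String) : pvWt (s ++ t) = pvWt s + pvWt t := by
  simp [pvWt, String.toList_append, List.filter_append]

-- DFS-order leaf list: the common specification both ports are reduced to
def pvL (pool : List String) : Nat → String → List String
  | 0, _ => []
  | f + 1, ss => if pvWt ss = 4 then [ss] else pool.flatMap (fun e => pvL pool f (ss ++ e))

theorem pv_update_ofList {α : Type} [BEq α] [LawfulBEq α] (s : PySem.Set α) (xs : List α) :
    PySem.Set.update s (PySem.Set.ofList xs) = PySem.Set.update s xs := by
  rw [PySem.Set.update_eq_append_filter, PySem.Set.update_eq_append_filter, PySem.Set.ofList_ofList]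

theorem pv_foldl_update {α β : Type} [BEq β] (g : α → List β) (l : List α) (s : PySem.Set β) :
    l.foldl (fun res a => PySem.Set.update res (g a)) s = PySem.Set.update s (l.flatMap g) := by
  induction l generalizing s with
  | nil => simp [PySem.Set.update_nil]
  | cons a l ih => simp [ih, PySem.Set.update_append]

theorem pv_A_eq (pool : List String) : ∀ (f : Nat) (ss : String),
    d_repA pool f ss = PySem.Set.ofList (pvL pool f ss) := by
  intro f
  induction f with
  | zero => intro ss; simp [d_repA, pvL, PySem.Set.ofList_nil, PySem.Set.empty]
  | succ f ih =>
    intro ss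
    rw [d_repA, pvL, pv_wt_eq]
    by_cases h : pvWt ss = 4
    · rw [if_pos (by exact_mod_cast h), if_pos h]
    · rw [if_neg (by exact_mod_cast h), if_neg h]
      simp only [ih, pv_update_ofList]
      rw [pv_foldl_update]
      rw [show (PySem.Set.empty : PySem.Set String) = [] from rfl, PySem.Set.update_nil_left]

theorem pv_flatMap_congr {α β : Type} (l : List α) (f g : α → List β)
    (h : ∀ a ∈ l, f a = g a) : l.flatMap f = l.flatMap g := by
  induction l with
  | nil => rfl
  | cons a l ih =>
    simp only [List.flatMap_cons, h a (by simp), ih (fun b hb => h b (by simp [hb]))]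

-- one level of expansion, and the iterated frontier (proof-side notions)
def bExpand (pool : List String) (frontier : List String) : List String :=
  frontier.flatMap (fun s => pool.map (fun e => s ++ e))

def pvFI (pool : List String) : Nat → List String → List String
  | 0, fr => fr
  | k + 1, fr => pvFI pool k (bExpand pool fr)

-- the DFS leaf list of a uniform-weight tree is the frontier after the right number of expansions
theorem pv_L_frontier (pool : List String) (w : Nat) (hw : 1 ≤ w)
    (hp : ∀ e ∈ pool, pvWt e = w) :
    ∀ (k : Nat) (fr : List String) (f : Nat), (∀ s ∈ fr, pvWt s + k * w = 4) → k + 1 ≤ f →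
    fr.flatMap (pvL pool f) = pvFI pool k fr := by
  intro k
  induction k with
  | zero =>
    intro fr f hfr hf
    obtain ⟨f', rfl⟩ : ∃ f', f = f' + 1 := ⟨f - 1, by omega⟩
    rw [pvFI]
    rw [pv_flatMap_congr fr _ (fun s => [s])
      (fun s hs => by rw [pvL, if_pos (by have := hfr s hs; omega)])]
    simp
  | succ k ih =>
    intro fr f hfr hf
    obtain ⟨f', rfl⟩ : ∃ f', f = f' + 1 := ⟨f - 1, by omega⟩
    rw [pvFI]
    rw [pv_flatMap_congr fr (pvL pool (f' + 1))
      (fun s => pool.flatMap (fun e => pvL pool f' (s ++ e)))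
      (fun s hs => by
        rw [pvL, if_neg (by
          have := hfr s hs; have := hw
          have hsm : (k + 1) * w = k * w + w := Nat.succ_mul k w
          omega)])]
    rw [← ih (bExpand pool fr) f' ?hnext (by omega)]
    · rw [bExpand, List.flatMap_assoc]
      refine pv_flatMap_congr fr _ _ (fun s _ => ?_)
      rw [List.flatMap_map]
    case hnext =>
      intro t ht
      simp only [bExpand, List.mem_flatMap, List.mem_map] at ht
      obtain ⟨s, hs, e, he, rfl⟩ := ht
      rw [pv_wt_append, hp e he]
      have := hfr s hs
      have hsm : (k + 1) * w = k * w + w := Nat.succ_mul k w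
      omega

-- the inner for-loop on an all-incomplete frontier only extends nxt
theorem pv_fold_incomplete (pool : List String) :
    ∀ (fr : List String) (res : PySem.Set String) (nxt : List String),
    (∀ s ∈ fr, pvWt s < 4) →
    fr.foldl (bInner pool) (res, nxt) = (res, nxt ++ bExpand pool fr) := by
  intro fr
  induction fr with
  | nil => intro res nxt _; simp [bExpand]
  | cons s fr ih =>
    intro res nxt h
    have hs := h s (by simp)
    rw [List.foldl_cons, bInner]
    simp only [pv_wt_eq]
    rw [if_neg (by exact_mod_cast (by omega : ¬ pvWt s = 4)),
      if_pos (by exact_mod_cast hs)]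
    rw [ih res _ (fun t ht => h t (by simp [ht]))]
    simp [bExpand]

-- the inner for-loop on an all-complete frontier only collects into res
theorem pv_fold_complete (pool : List String) :
    ∀ (fr : List String) (res : PySem.Set String) (nxt : List String),
    (∀ s ∈ fr, pvWt s = 4) →
    fr.foldl (bInner pool) (res, nxt) = (PySem.Set.update res fr, nxt) := by
  intro fr
  induction fr with
  | nil => intro res nxt _; simp [PySem.Set.update_nil]
  | cons s fr ih =>
    intro res nxt h
    rw [List.foldl_cons, bInner]
    simp only [pv_wt_eq]
    rw [if_pos (by exact_mod_cast h s (by simp))]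
    rw [ih _ _ (fun t ht => h t (by simp [ht])), PySem.Set.update_cons]

theorem pv_bLoop_nil (pool : List String) (f : Nat) (res : PySem.Set String) :
    bLoop pool f res [] = res := by
  cases f <;> rfl

theorem pv_bLoop_cons (pool : List String) (f : Nat) (res : PySem.Set String)
    (s : String) (fr : List String) :
    bLoop pool (f + 1) res (s :: fr) =
      bLoop pool f ((s :: fr).foldl (bInner pool) (res, [])).1
        ((s :: fr).foldl (bInner pool) (res, [])).2 := rfl

-- B's while loop on a uniform-weight frontier collects exactly the iterated frontier
theorem pv_bLoop_run (pool : List String) (w : Nat) (hw : 1 ≤ w)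
    (hpool : pool ≠ []) (hp : ∀ e ∈ pool, pvWt e = w) :
    ∀ (k : Nat) (fr : List String) (res : PySem.Set String) (f : Nat),
    fr ≠ [] → (∀ s ∈ fr, pvWt s + k * w = 4) → k + 1 ≤ f →
    bLoop pool f res fr = PySem.Set.update res (pvFI pool k fr) := by
  intro k
  induction k with
  | zero =>
    intro fr res f hfr h hf
    obtain ⟨f', rfl⟩ : ∃ f', f = f' + 1 := ⟨f - 1, by omega⟩
    obtain ⟨s, fr', rfl⟩ : ∃ s fr', fr = s :: fr' := by
      cases fr with
      | nil => exact absurd rfl hfr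
      | cons s fr' => exact ⟨s, fr', rfl⟩
    rw [pv_bLoop_cons]
    rw [pv_fold_complete pool _ res [] (fun t ht => by have := h t ht; omega)]
    rw [pvFI, pv_bLoop_nil]
  | succ k ih =>
    intro fr res f hfr h hf
    obtain ⟨f', rfl⟩ : ∃ f', f = f' + 1 := ⟨f - 1, by omega⟩
    obtain ⟨s, fr', rfl⟩ : ∃ s fr', fr = s :: fr' := by
      cases fr with
      | nil => exact absurd rfl hfr
      | cons s fr' => exact ⟨s, fr', rfl⟩
    rw [pv_bLoop_cons]
    rw [pv_fold_incomplete pool _ res [] (fun t ht => by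
      have := h t ht
      have hsm : (k + 1) * w = k * w + w := Nat.succ_mul k w
      have hwk : 1 ≤ (k + 1) * w := by
        have := Nat.succ_mul k w
        omega
      omega)]
    simp only [List.nil_append]
    rw [pvFI]
    refine ih (bExpand pool (s :: fr')) res f' ?hne ?hwts (by omega)
    case hne =>
      obtain ⟨e, pool', rfl⟩ : ∃ e pool', pool = e :: pool' := by
        cases pool with
        | nil => exact absurd rfl hpool
        | cons e pool' => exact ⟨e, pool', rfl⟩
      simp [bExpand]
    case hwts =>
      intro t ht
      simp only [bExpand, List.mem_flatMap, List.mem_map] at ht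
      obtain ⟨u, hu, e, he, rfl⟩ := ht
      rw [pv_wt_append, hp e he]
      have := h u hu
      have hsm : (k + 1) * w = k * w + w := Nat.succ_mul k w
      omega

-- ===== VERDICT (by name: the statement is the Claim_ definition above) =====
theorem d_rep_spec : Claim_equal_d_rep := by
  intro pool ss _ hpre
  show d_rep pool ss = d_rep_alt pool ss
  by_cases h4 : pvWt ss = 4
  · -- both return {ss} immediately
    rw [d_rep, d_rep_alt, d_repA, pv_wt_eq, if_pos (by exact_mod_cast h4)]
    rw [show (5 : Nat) = 4 + 1 from rfl, pv_bLoop_cons]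
    rw [List.foldl_cons, bInner]
    simp only [pv_wt_eq]
    rw [if_pos (by exact_mod_cast h4)]
    simp only [List.foldl_nil]
    rw [pv_bLoop_nil]
    rfl
  · rcases hpre with rfl | h | ⟨hlt, hp, hw, hdvd⟩
    · -- empty pool: both return the empty set
      rw [d_rep, d_rep_alt, d_repA, pv_wt_eq, if_neg (by exact_mod_cast h4)]
      rw [show (5 : Nat) = 4 + 1 from rfl, pv_bLoop_cons]
      rw [List.foldl_cons, bInner]
      simp only [pv_wt_eq]
      rw [if_neg (by exact_mod_cast h4)]
      by_cases hlt : pvWt ss < 4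
      · rw [if_pos (by exact_mod_cast hlt)]
        simp only [List.map_nil, List.append_nil, List.foldl_nil]
        rw [pv_bLoop_nil]
      · rw [if_neg (by exact_mod_cast hlt)]
        simp only [List.foldl_nil]
        rw [pv_bLoop_nil]
    · exact absurd h h4
    · -- uniform positive weight w dividing the deficit
      set w := pvWt (pool.headD "") with hwdef
      have hpool : pool ≠ [] := by
        intro hnil
        rw [hnil] at hwdef
        simp [pvWt] at hwdef
        omega
      obtain ⟨k, hk⟩ := hdvd
      have hk4 : pvWt ss + k * w = 4 := by
        have hc := Nat.mul_comm w k
        omega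
      have hkle : k + 1 ≤ 5 := by
        have h1 : k * w ≤ 4 := by have hc := Nat.mul_comm w k; omega
        have h2 : k ≤ k * w := Nat.le_mul_of_pos_right k (by omega)
        omega
      rw [d_rep, pv_A_eq pool 5 ss, d_rep_alt]
      have hL : pvL pool 5 ss = pvFI pool k [ss] := by
        have := pv_L_frontier pool w hw hp k [ss] 5
          (by intro s hs; simp at hs; subst hs; exact hk4) hkle
        simpa using this
      rw [hL, pv_bLoop_run pool w hw hpool hp k [ss] PySem.Set.empty 5 (by simp)
        (by intro s hs; simp at hs; subst hs; exact hk4) hkle]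
      rw [show (PySem.Set.empty : PySem.Set String) = [] from rfl, PySem.Set.update_nil_left]
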